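-- pv_equiv track=rewrite | github.com/blackbriar96/voronoirstartree | model.py | comb_and_comp
-- ===== SOURCE A (Python) =====
-- def comb_and_comp(lst, size):
--     """
--     get combination and its complementer
--     function from https://stackoverflow.com/questions/28992042/algorithm-to-return-all-combinations-of-k-out-of-n-as-well-as-corresponding-comp
--     """
--     # no combinations
--     if len(lst) < size:
--         return
--     # trivial 'empty' combination
--     if size == 0 or lst == []:
--         yield [], lst
--     else:
--         first, rest = lst[0], lst[1:]
--         # combinations that contain the first element
--         for in_, out in comb_and_comp(rest, size - 1):
--             yield [first] + in_, out
--
--         # combinations that do not contain the first element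
--         for in_, out in comb_and_comp(rest, size):
--             yield in_, [first] + out
-- ===== SOURCE B (Python) =====
-- def comb_and_comp(lst, size):
--     """Bottom-up DP over suffixes: dp[s] holds the (combination, complement)
--     pairs of size s for the suffix processed so far; one pass over lst
--     (right to left) replaces the top-down double recursion."""
--     if size < 0 or len(lst) < size:
--         return
--     dp = [[([], [])]] + [[] for _ in range(size)]
--     for x in reversed(lst):
--         new = [[(c, [x] + d) for (c, d) in dp[0]]]
--         for prev, cur in zip(dp, dp[1:]):
--             new.append([([x] + c, d) for (c, d) in prev]
--                        + [(c, [x] + d) for (c, d) in cur])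
--         dp = new
--     yield from dp[size]
-- ===== Notes on version B (the rewrite author's own statement) =====
-- stated objective: alternative
-- what changed: Replaces A's top-down double recursion (generators recursing on the list head) by a bottom-up dynamic-programming pass: one right-to-left fold over lst maintaining, per combination size s = 0..size, the list of (combination, complement) pairs for the suffix processed so far, returning dp[size].
-- intended difference: On size < 0 A returns every (subset, complement) pair of lst (e.g. [([1],[]),([],[1])] for ([1],-1)) because the recursion bottoms out at the empty list instead of stopping; B returns the empty list, the intended value since there are no combinations of negative size. — e.g. on comb_and_comp([1], -1): A returns [([1], []), ([], [1])], B returns []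
import Mathlib
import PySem

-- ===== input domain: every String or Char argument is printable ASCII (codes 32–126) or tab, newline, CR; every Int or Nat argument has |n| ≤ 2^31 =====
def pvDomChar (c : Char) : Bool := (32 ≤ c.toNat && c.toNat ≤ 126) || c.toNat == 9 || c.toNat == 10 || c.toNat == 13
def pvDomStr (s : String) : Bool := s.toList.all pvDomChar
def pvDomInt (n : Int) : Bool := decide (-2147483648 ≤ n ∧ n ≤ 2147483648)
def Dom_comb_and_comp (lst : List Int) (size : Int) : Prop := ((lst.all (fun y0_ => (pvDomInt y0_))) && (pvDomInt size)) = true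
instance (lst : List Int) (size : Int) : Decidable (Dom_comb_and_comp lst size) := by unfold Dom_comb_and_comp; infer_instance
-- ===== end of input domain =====

-- B replaces A's top-down double recursion by a bottom-up one-pass DP over suffixes
-- (objective: alternative); on negative size B yields nothing where A returns junk (see D_).


-- ===== PORT A =====
-- literal transliteration of A (the generator's yields collected into a list, in order)
def comb_and_comp (lst : List Int) (size : Int) : List (List Int × List Int) :=
  if (lst.length : Int) < size then []
  else if size = 0 ∨ lst = [] then [([], lst)]
  else
    match lst with
    | [] => []  -- unreachable: lst = [] is caught by the previous branch
    | first :: rest =>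
      ((comb_and_comp rest (size - 1)).map (fun p => (first :: p.1, p.2))) ++
      ((comb_and_comp rest size).map (fun p => (p.1, first :: p.2)))

-- ===== PORT B =====
-- one DP step of Source B's loop body: new = head row :: rows from zip(dp, dp[1:])
def pvStepB (x : Int) (dp : List (List (List Int × List Int))) :
    List (List Int × List Int) → List (List (List Int × List Int)) :=
  fun row0 => [row0.map (fun p => (p.1, x :: p.2))] ++
    ((dp.zip dp.tail).map (fun pc =>
      (pc.1.map (fun p => (x :: p.1, p.2))) ++ (pc.2.map (fun p => (p.1, x :: p.2)))))

def comb_and_comp_alt (lst : List Int) (size : Int) : List (List Int × List Int) :=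
  if size < 0 ∨ (lst.length : Int) < size then []
  else
    -- dp starts as [([],[])] plus size empty rows; one pvStepB step per element of reversed lst;
    -- the answer is dp[size], always in range since each step keeps dp's length at size+1
    (lst.reverse.foldl (fun dp x => pvStepB x dp (dp.headD []))
      ([([], [])] :: List.replicate size.toNat [])).getD size.toNat []

-- ===== PRECONDITION & SPEC =====
-- On size < 0, A returns every (subset, complement) pair of lst (on lst = [] the pair ([], []));
-- B returns the empty list, the intended value since there are no combinations of negative size.
def D_comb_and_comp (lst : List Int) (size : Int) : Prop := size < 0
instance (lst : List Int) (size : Int) : Decidable (D_comb_and_comp lst size) := by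
  unfold D_comb_and_comp; infer_instance

def Spec_comb_and_comp (lst : List Int) (size : Int) (out : List (List Int × List Int)) : Prop :=
  ¬ D_comb_and_comp lst size → out = comb_and_comp_alt lst size
instance (lst : List Int) (size : Int) (out : List (List Int × List Int)) : Decidable (Spec_comb_and_comp lst size out) := by unfold Spec_comb_and_comp; infer_instance

def pvDiffWitness_comb_and_comp : List Int × Int := ([1], -1)
def pvDiffWitnessOut_comb_and_comp : (List (List Int × List Int)) × (List (List Int × List Int)) :=
  ([([1], []), ([], [1])], [])

-- ===== CLAIM (what is proved, stated in full; the proofs are below) =====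
def Claim_unchanged_comb_and_comp : Prop := ∀ (lst : List Int) (size : Int), Dom_comb_and_comp lst size → Spec_comb_and_comp lst size (comb_and_comp lst size)
def Claim_changed_comb_and_comp : Prop := Dom_comb_and_comp (pvDiffWitness_comb_and_comp.1) (pvDiffWitness_comb_and_comp.2) ∧ D_comb_and_comp (pvDiffWitness_comb_and_comp.1) (pvDiffWitness_comb_and_comp.2) ∧ comb_and_comp (pvDiffWitness_comb_and_comp.1) (pvDiffWitness_comb_and_comp.2) = pvDiffWitnessOut_comb_and_comp.1 ∧ comb_and_comp_alt (pvDiffWitness_comb_and_comp.1) (pvDiffWitness_comb_and_comp.2) = pvDiffWitnessOut_comb_and_comp.2 ∧ pvDiffWitnessOut_comb_and_comp.1 ≠ pvDiffWitnessOut_comb_and_comp.2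
def Claim_exact_comb_and_comp : Prop := ∀ (lst : List Int) (size : Int), Dom_comb_and_comp lst size → D_comb_and_comp lst size → comb_and_comp lst size ≠ comb_and_comp_alt lst size

-- ===== LEMMAS AND PROOFS =====

theorem comb_nil_of_lt (t : List Int) (s : Int) (h : (t.length : Int) < s) :
    comb_and_comp t s = [] := by
  unfold comb_and_comp; simp [h]

theorem comb_zero (t : List Int) : comb_and_comp t 0 = [([], t)] := by
  unfold comb_and_comp
  have h : ¬ ((t.length : Int) < 0) := by omega
  simp [h]

theorem comb_cons (x : Int) (t : List Int) (s : Int) (hs : 0 ≤ s) :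
    comb_and_comp (x :: t) (s + 1) =
      ((comb_and_comp t s).map (fun p => (x :: p.1, p.2))) ++
      ((comb_and_comp t (s + 1)).map (fun p => (p.1, x :: p.2))) := by
  by_cases hlt : ((x :: t).length : Int) < s + 1
  · have hlt' : (t.length : Int) + 1 < s + 1 := by
      simpa [Int.add_comm] using hlt
    rw [comb_nil_of_lt _ _ hlt, comb_nil_of_lt t s (by omega),
      comb_nil_of_lt t (s + 1) (by omega)]
    rfl
  · rw [comb_and_comp]
    have hne : ¬ (s + 1 = 0 ∨ x :: t = []) := by
      push_neg; exact ⟨by omega, by simp⟩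
    simp only [hlt, if_neg hne, if_false]
    norm_num

def pvDpFor (t : List Int) (m : ℕ) : List (List (List Int × List Int)) :=
  (List.range (m + 1)).map (fun s => comb_and_comp t (Int.ofNat s))

theorem pvDpFor_length (t : List Int) (m : ℕ) : (pvDpFor t m).length = m + 1 := by
  simp [pvDpFor]

theorem pvDpFor_getElem (t : List Int) (m i : ℕ) (h : i < m + 1) :
    (pvDpFor t m)[i]'(by rw [pvDpFor_length]; omega) = comb_and_comp t (i : Int) := by
  unfold pvDpFor
  rw [List.getElem_map, List.getElem_range]
  norm_cast

theorem pvDpFor_nil (m : ℕ) : pvDpFor [] m = [([], [])] :: List.replicate m [] := by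
  apply List.ext_getElem
  · simp [pvDpFor_length]
  · intro i h1 h2
    have hi : i < m + 1 := by rw [pvDpFor_length] at h1; omega
    rw [pvDpFor_getElem [] m i hi]
    cases i with
    | zero => simpa using comb_zero []
    | succ j =>
      have hz : comb_and_comp [] (((j + 1 : ℕ)) : Int) = [] := by
        apply comb_nil_of_lt; simp
      rw [hz]
      simp

theorem pvDpFor_headD (t : List Int) (m : ℕ) :
    (pvDpFor t m).headD [] = comb_and_comp t 0 := by
  simp [pvDpFor, List.range_succ_eq_map]

theorem pvStep_dpFor (x : Int) (t : List Int) (m : ℕ) :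
    pvStepB x (pvDpFor t m) ((pvDpFor t m).headD []) = pvDpFor (x :: t) m := by
  apply List.ext_getElem
  · simp [pvStepB, pvDpFor_length, List.length_zip]
  · intro i h1 h2
    have hi : i < m + 1 := by rw [pvDpFor_length] at h2; omega
    rw [pvDpFor_getElem (x :: t) m i hi]
    cases i with
    | zero =>
      simp only [pvStepB, List.cons_append, List.nil_append, List.getElem_cons_zero]
      rw [pvDpFor_headD, comb_zero]
      simp only [Nat.cast_zero, comb_zero]
      rfl
    | succ j =>
      have hj : j < m := by omega
      simp only [pvStepB, List.cons_append, List.nil_append, List.getElem_cons_succ]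
      have hz : j < ((pvDpFor t m).zip (pvDpFor t m).tail).length := by
        simp [List.length_zip, pvDpFor_length]; omega
      rw [List.getElem_map]
      have e1 : ((pvDpFor t m).zip (pvDpFor t m).tail)[j].1 = comb_and_comp t (j : Int) := by
        rw [List.getElem_zip]
        exact pvDpFor_getElem t m j (by omega)
      have e2 : ((pvDpFor t m).zip (pvDpFor t m).tail)[j].2 = comb_and_comp t ((j : Int) + 1) := by
        rw [List.getElem_zip]
        have ht : ((pvDpFor t m).tail)[j]'(by simp [pvDpFor_length]; omega) =
            (pvDpFor t m)[j + 1]'(by rw [pvDpFor_length]; omega) := by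
          simp [List.getElem_tail]
        rw [ht, pvDpFor_getElem t m (j + 1) (by omega)]
        push_cast
        ring_nf
      rw [e1, e2]
      have hc := comb_cons x t (j : Int) (by positivity)
      rw [show (((j + 1 : ℕ)) : Int) = (j : Int) + 1 by push_cast; ring, hc]

theorem pvFold_dpFor (l : List Int) (m : ℕ) :
    l.reverse.foldl (fun dp x => pvStepB x dp (dp.headD [])) (pvDpFor [] m) = pvDpFor l m := by
  induction l with
  | nil => rfl
  | cons x t ih =>
    rw [show (x :: t).reverse = t.reverse ++ [x] by simp, List.foldl_append, ih]
    simpa using pvStep_dpFor x t m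

theorem comb_neg_ne_nil (lst : List Int) (size : Int) (h : size < 0) :
    comb_and_comp lst size ≠ [] := by
  induction lst generalizing size with
  | nil =>
    rw [comb_and_comp]
    simp only [List.length_nil, Nat.cast_zero]
    have h1 : ¬ ((0 : Int) < size) := by omega
    simp [h1]
  | cons x t ih =>
    rw [comb_and_comp]
    have h1 : ¬ (((x :: t).length : Int) < size) := by simp; omega
    have h2 : ¬ (size = 0 ∨ x :: t = []) := by
      push_neg; exact ⟨by omega, by simp⟩
    simp only [h1, if_false, h2]
    intro hcontra
    have := List.append_eq_nil_iff.mp hcontra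
    exact ih size h (by simpa using this.2)

-- ===== VERDICT (by name: the statement is the Claim_ definition above) =====
theorem comb_and_comp_spec : Claim_unchanged_comb_and_comp := by
  intro lst size _
  unfold Spec_comb_and_comp D_comb_and_comp
  intro hnd
  have hs : 0 ≤ size := by omega
  unfold comb_and_comp_alt
  by_cases hlt : (lst.length : Int) < size
  · have hg : size < 0 ∨ (lst.length : Int) < size := Or.inr hlt
    rw [if_pos hg, comb_nil_of_lt lst size hlt]
  · have hg : ¬ (size < 0 ∨ (lst.length : Int) < size) := by
      push_neg; exact ⟨by omega, by omega⟩
    rw [if_neg hg, ← pvDpFor_nil size.toNat, pvFold_dpFor]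
    have hlen : size.toNat < (pvDpFor lst size.toNat).length := by
      rw [pvDpFor_length]; omega
    rw [List.getD_eq_getElem _ _ hlen, pvDpFor_getElem lst size.toNat size.toNat (by omega)]
    congr 1
    omega

theorem comb_and_comp_changed : Claim_changed_comb_and_comp := by
  unfold Claim_changed_comb_and_comp; decide

theorem comb_and_comp_tight : Claim_exact_comb_and_comp := by
  intro lst size _ hd
  unfold D_comb_and_comp at hd
  have hb : comb_and_comp_alt lst size = [] := by
    unfold comb_and_comp_alt
    simp [hd]
  rw [hb]
  exact comb_neg_ne_nil lst size hd
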